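-- pv_equiv track=rewrite | github.com/mishania6678/war_of_tanks | main.py | detect_hit
-- ===== SOURCE A (Python) =====
-- from typing import List, Tuple
--
-- def detect_hit(occupied_cords: List[Tuple[List[int]]], xcenter, ycenter, r) -> bool:
--     """Detects if cannonball shot tank"""
--
--     def check_intersection(point):
--         return (point[0] - xcenter) ** 2 + (point[1] - ycenter) ** 2 == r ** 2
--
--     for tank_cords in occupied_cords:
--         for xcord in tank_cords[0][25: 55]:
--             for ycord in tank_cords[1][25: 55]:
--                 if check_intersection((xcord, ycord)) or check_intersection((xcord, ycord)):
--                     occupied_cords.remove(tank_cords)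
--                     return 1
--     return 0
-- ===== SOURCE B (Python) =====
-- def _isqrt(n):
--     """Floor integer square root by binary search (n >= 0)."""
--     lo, hi = 0, n
--     while lo < hi:
--         mid = (lo + hi + 1) // 2
--         if mid * mid <= n:
--             lo = mid
--         else:
--             hi = mid - 1
--     return lo
--
--
-- def detect_hit(occupied_cords, xcenter, ycenter, r) -> bool:
--     """Detects if cannonball shot tank"""
--     r2 = r * r
--     for tank_cords in occupied_cords:
--         ys = set(tank_cords[1][25:55])
--         for xcord in tank_cords[0][25:55]:
--             target = r2 - (xcord - xcenter) ** 2
--             if target >= 0: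
--                 s = _isqrt(target)
--                 if s * s == target and (ycenter + s in ys or ycenter - s in ys):
--                     occupied_cords.remove(tank_cords)
--                     return 1
--     return 0
-- ===== Notes on version B (the rewrite author's own statement) =====
-- stated objective: alternative
-- what changed: Instead of scanning all 30x30 (x,y) pairs against the circle equation, B solves the circle equation in closed form: for each x it computes target = r^2-(x-xcenter)^2 and, when target is a perfect square (checked with a hand-written binary-search integer square root), tests only the two candidate y values ycenter+-isqrt(target) against a set of the tank's y slice (per-tank work 30*log r candidates instead of 900 pairs, not measurably faster on the generated inputs).
-- outside the precondition, e.g. on detect_hit([([],)], 0, 0, 0): A returns 0, B raises IndexError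
import Mathlib
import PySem

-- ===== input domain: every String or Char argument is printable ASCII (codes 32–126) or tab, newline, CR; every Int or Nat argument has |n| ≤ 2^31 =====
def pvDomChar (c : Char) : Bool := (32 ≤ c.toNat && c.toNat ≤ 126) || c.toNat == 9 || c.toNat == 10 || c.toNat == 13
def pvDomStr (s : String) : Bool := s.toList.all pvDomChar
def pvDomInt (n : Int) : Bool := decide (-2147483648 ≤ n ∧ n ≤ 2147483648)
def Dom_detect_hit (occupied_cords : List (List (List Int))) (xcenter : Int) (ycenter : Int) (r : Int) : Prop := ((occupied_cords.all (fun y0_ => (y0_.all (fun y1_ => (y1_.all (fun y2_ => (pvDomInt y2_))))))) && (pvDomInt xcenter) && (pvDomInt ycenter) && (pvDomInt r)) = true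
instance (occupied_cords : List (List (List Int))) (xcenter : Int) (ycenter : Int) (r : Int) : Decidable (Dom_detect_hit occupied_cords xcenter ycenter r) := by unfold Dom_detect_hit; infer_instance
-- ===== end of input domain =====

-- ===== PORT A =====
-- B replaces A's 30x30 pair scan by solving the circle equation in closed form with an integer
-- square root; only the RETURN value is proved equal — both Pythons also perform the same
-- occupied_cords.remove mutation on a hit.

-- check_intersection((xcord, ycord)) of A
def pvCheck (xcenter ycenter r x y : Int) : Bool :=
  (x - xcenter) ^ 2 + (y - ycenter) ^ 2 == r ^ 2

-- A's inner two loops over tank_cords[0][25:55] and tank_cords[1][25:55]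
def pvTankA (xcenter ycenter r : Int) (t : List (List Int)) : Bool :=
  (PySem.List.slice (PySem.List.pyGetD t 0 []) (some 25) (some 55)).any fun x =>
    (PySem.List.slice (PySem.List.pyGetD t 1 []) (some 25) (some 55)).any fun y =>
      pvCheck xcenter ycenter r x y || pvCheck xcenter ycenter r x y

def detect_hit (occupied_cords : List (List (List Int))) (xcenter : Int) (ycenter : Int) (r : Int) : Int :=
  match occupied_cords with
  | [] => 0
  | t :: rest => if pvTankA xcenter ycenter r t then 1 else detect_hit rest xcenter ycenter r

-- ===== PORT B =====
-- _isqrt of Source B: binary-search floor square root (exact on n ≥ 0, B's only call sites).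
-- The fuel argument is only a totality device: each iteration shrinks hi - lo by at least 1,
-- so the initial fuel n = hi - lo is never exhausted before the loop condition fails.
def pvIsqrtGo : Nat → Int → Int → Int → Int
  | 0, _, lo, _ => lo
  | fuel + 1, n, lo, hi =>
    if lo < hi then
      let mid := PySem.Int.floordiv (lo + hi + 1) 2
      if mid * mid ≤ n then pvIsqrtGo fuel n mid hi else pvIsqrtGo fuel n lo (mid - 1)
    else lo

def pvIsqrt (n : Int) : Int := pvIsqrtGo n.toNat n 0 n

-- B's per-tank check: set of the y slice, closed-form y candidates for each x
def pvTankB (xcenter ycenter r : Int) (t : List (List Int)) : Bool :=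
  let ys : PySem.Set Int :=
    PySem.Set.ofList (PySem.List.slice (PySem.List.pyGetD t 1 []) (some 25) (some 55))
  (PySem.List.slice (PySem.List.pyGetD t 0 []) (some 25) (some 55)).any fun x =>
    let target := r * r - (x - xcenter) ^ 2
    if 0 ≤ target then
      let s := pvIsqrt target
      s * s == target &&
        (PySem.Set.contains ys (ycenter + s) || PySem.Set.contains ys (ycenter - s))
    else false

def detect_hit_alt (occupied_cords : List (List (List Int))) (xcenter : Int) (ycenter : Int) (r : Int) : Int :=
  match occupied_cords with
  | [] => 0
  | t :: rest => if pvTankB xcenter ycenter r t then 1 else detect_hit_alt rest xcenter ycenter r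

-- ===== PRECONDITION & SPEC =====
-- Pre_ excludes tanks with fewer than two coordinate rows: there Python A in general raises
-- IndexError (and the few such inputs on which A still returns 0 only do so by accident of
-- lazy evaluation order -- an empty x slice never touches tank_cords[1] -- where B's eager
-- set construction raises instead).
def Pre_detect_hit (occupied_cords : List (List (List Int))) (xcenter : Int) (ycenter : Int) (r : Int) : Prop :=
  ∀ t ∈ occupied_cords, 2 ≤ t.length
instance (occupied_cords : List (List (List Int))) (xcenter : Int) (ycenter : Int) (r : Int) : Decidable (Pre_detect_hit occupied_cords xcenter ycenter r) := by unfold Pre_detect_hit; infer_instance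
def pvWitness_detect_hit : List (List (List Int)) × Int × Int × Int := ([[[0], [0]]], 0, 0, 1)

def Spec_detect_hit (occupied_cords : List (List (List Int))) (xcenter : Int) (ycenter : Int) (r : Int) (out : Int) : Prop := out = detect_hit_alt occupied_cords xcenter ycenter r
instance (occupied_cords : List (List (List Int))) (xcenter : Int) (ycenter : Int) (r : Int) (out : Int) : Decidable (Spec_detect_hit occupied_cords xcenter ycenter r out) := by unfold Spec_detect_hit; infer_instance

-- ===== CLAIM (what is proved, stated in full; the proofs are below) =====
def Claim_equal_detect_hit : Prop := ∀ (occupied_cords : List (List (List Int))) (xcenter : Int) (ycenter : Int) (r : Int), Dom_detect_hit occupied_cords xcenter ycenter r → Pre_detect_hit occupied_cords xcenter ycenter r → Spec_detect_hit occupied_cords xcenter ycenter r (detect_hit occupied_cords xcenter ycenter r)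

-- ===== LEMMAS AND PROOFS =====

-- the binary search maintains lo*lo ≤ n < (hi+1)^2 and returns the floor square root
lemma pvIsqrtGo_spec : ∀ (fuel : Nat) (n lo hi : Int), (hi - lo).toNat ≤ fuel →
    0 ≤ lo → lo ≤ hi → lo * lo ≤ n → n < (hi + 1) * (hi + 1) →
    0 ≤ pvIsqrtGo fuel n lo hi ∧ pvIsqrtGo fuel n lo hi * pvIsqrtGo fuel n lo hi ≤ n ∧
      n < (pvIsqrtGo fuel n lo hi + 1) * (pvIsqrtGo fuel n lo hi + 1) := by
  intro fuel
  induction fuel with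
  | zero =>
      intro n lo hi hf h0 hlh hlo hhi
      have : lo = hi := by omega
      subst this
      exact ⟨h0, hlo, hhi⟩
  | succ f ih =>
      intro n lo hi hf h0 hlh hlo hhi
      simp only [pvIsqrtGo]
      by_cases hlt : lo < hi
      · rw [if_pos hlt]
        have hb : lo < PySem.Int.floordiv (lo + hi + 1) 2 ∧
            PySem.Int.floordiv (lo + hi + 1) 2 ≤ hi := by
          rw [PySem.Int.floordiv_eq_ediv_of_pos (by omega : (0:Int) < 2)]
          omega
        set mid := PySem.Int.floordiv (lo + hi + 1) 2 with hmid
        by_cases hle : mid * mid ≤ n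
        · rw [if_pos hle]
          exact ih n mid hi (by omega) (by omega) (by omega) hle hhi
        · rw [if_neg hle]
          have hsq : (mid - 1 + 1) * (mid - 1 + 1) = mid * mid := by ring
          exact ih n lo (mid - 1) (by omega) h0 (by omega) hlo (by omega)
      · rw [if_neg hlt]
        have : lo = hi := by omega
        subst this
        exact ⟨h0, hlo, hhi⟩

lemma pvIsqrt_spec (n : Int) (hn : 0 ≤ n) :
    0 ≤ pvIsqrt n ∧ pvIsqrt n * pvIsqrt n ≤ n ∧ n < (pvIsqrt n + 1) * (pvIsqrt n + 1) :=
  pvIsqrtGo_spec n.toNat n 0 n (by omega) (le_refl 0) hn (by simpa using hn) (by nlinarith)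

-- for n ≥ 0, m*m = n with the isqrt brackets forces |m| = isqrt n
lemma pvIsqrt_unique (n m : Int) (hn : 0 ≤ n) (hm : m * m = n) :
    m = pvIsqrt n ∨ m = -pvIsqrt n := by
  obtain ⟨hs0, hs1, hs2⟩ := pvIsqrt_spec n hn
  by_cases h : 0 ≤ m
  · left; nlinarith
  · right; nlinarith

-- per-x: A's scan of the y slice equals B's closed-form two-candidate test
lemma pvInner_eq (xcenter ycenter r x : Int) (ys : List Int) :
    (ys.any fun y => pvCheck xcenter ycenter r x y || pvCheck xcenter ycenter r x y)
      = (let target := r * r - (x - xcenter) ^ 2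
         if 0 ≤ target then
           let s := pvIsqrt target
           s * s == target &&
             (PySem.Set.contains (PySem.Set.ofList ys) (ycenter + s) ||
              PySem.Set.contains (PySem.Set.ofList ys) (ycenter - s))
         else false) := by
  rw [Bool.eq_iff_iff]
  simp only [List.any_eq_true, Bool.or_self, pvCheck, beq_iff_eq]
  by_cases ht : 0 ≤ r * r - (x - xcenter) ^ 2
  · obtain ⟨hs0, hs1, hs2⟩ := pvIsqrt_spec (r * r - (x - xcenter) ^ 2) ht
    simp only [if_pos ht, Bool.and_eq_true, Bool.or_eq_true, beq_iff_eq,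
      PySem.Set.contains_iff, PySem.Set.mem_ofList]
    constructor
    · rintro ⟨y, hy, e⟩
      have hm : (y - ycenter) * (y - ycenter) = r * r - (x - xcenter) ^ 2 := by nlinarith
      rcases pvIsqrt_unique _ (y - ycenter) ht hm with h | h
      · refine ⟨by rw [← h]; exact hm, Or.inl ?_⟩
        have hyy : ycenter + pvIsqrt (r * r - (x - xcenter) ^ 2) = y := by omega
        rw [hyy]; exact hy
      · refine ⟨by nlinarith, Or.inr ?_⟩
        have hyy : ycenter - pvIsqrt (r * r - (x - xcenter) ^ 2) = y := by omega
        rw [hyy]; exact hy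
    · rintro ⟨hsq, h | h⟩
      · exact ⟨_, h, by nlinarith⟩
      · exact ⟨_, h, by nlinarith⟩
  · simp only [if_neg ht, Bool.false_eq_true, iff_false]
    rintro ⟨y, hy, e⟩
    nlinarith

lemma pvTank_eq (xcenter ycenter r : Int) (t : List (List Int)) :
    pvTankA xcenter ycenter r t = pvTankB xcenter ycenter r t := by
  simp only [pvTankA, pvTankB]
  congr 1
  funext x
  exact pvInner_eq xcenter ycenter r x _

lemma pvAll_eq (occ : List (List (List Int))) (xc yc r : Int) :
    detect_hit occ xc yc r = detect_hit_alt occ xc yc r := by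
  induction occ with
  | nil => rfl
  | cons t rest ih => simp only [detect_hit, detect_hit_alt, pvTank_eq, ih]

-- ===== VERDICT (by name: the statement is the Claim_ definition above) =====
theorem detect_hit_spec : Claim_equal_detect_hit := by
  intro occ xc yc r _ _
  exact pvAll_eq occ xc yc r
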